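-- pv_equiv track=rewrite | github.com/HayatoKTYM/prj-woz-first-order-delayed | a_t/main.py | u_t_maxcut
-- ===== SOURCE A (Python) =====
-- def u_t_maxcut(u, max_frame=30):
--     count = 0
--     for i in range(len(u)):
--         if u[i] != 1:
--             count = 0
--         else:
--             count += 1
--             if count > max_frame:
--                 u[i] = 0
--     return u
-- ===== SOURCE B (Python) =====
-- def u_t_maxcut(u, max_frame=30):
--     # run-based rewrite: find each maximal run of consecutive 1s and zero its tail
--     # past the first max(max_frame, 0) ones; mutates u in place (like A) and returns it
--     keep = max(max_frame, 0)
--     n = len(u)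
--     i = 0
--     while i < n:
--         if u[i] != 1:
--             i += 1
--             continue
--         j = i
--         while j < n and u[j] == 1:
--             j += 1
--         u[i + keep:j] = [0] * (j - i - keep)
--         i = j
--     return u
-- ===== Notes on version B (the rewrite author's own statement) =====
-- stated objective: alternative
-- what changed: Replaced the per-element counter loop by a run-detection scan that locates each maximal run of consecutive 1s and zeroes its tail beyond the first max(max_frame,0) ones with one slice assignment.
import Mathlib
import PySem

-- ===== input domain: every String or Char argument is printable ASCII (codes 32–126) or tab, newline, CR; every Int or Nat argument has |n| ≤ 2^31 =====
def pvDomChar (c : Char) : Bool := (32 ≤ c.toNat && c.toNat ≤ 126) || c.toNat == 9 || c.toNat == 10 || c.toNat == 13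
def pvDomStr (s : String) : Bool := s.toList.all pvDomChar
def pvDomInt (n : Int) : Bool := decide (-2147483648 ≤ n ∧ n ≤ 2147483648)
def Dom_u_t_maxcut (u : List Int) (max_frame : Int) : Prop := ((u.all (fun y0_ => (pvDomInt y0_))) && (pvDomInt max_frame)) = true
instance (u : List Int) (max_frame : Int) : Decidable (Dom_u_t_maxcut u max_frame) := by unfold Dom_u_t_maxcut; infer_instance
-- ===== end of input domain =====

-- B replaces A's per-element counter by a run-detection scan (find each maximal run of 1s,
-- zero its tail past the first max(max_frame,0) ones); both Pythons mutate the list in place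
-- and return it — the equivalence proved here is about the returned value.

-- B replaces A's per-element counter by a run-detection scan (find each maximal run of 1s,
-- zero its tail past the first max(max_frame,0) ones); both Pythons mutate the list in place
-- and return it -- the equivalence proved here is about the returned value.

-- ===== PORT A =====
-- A's index loop reads and writes only u[i] at step i, carrying `count`;
-- transliterated as the structural recursion over the list with the same state.
def utA : List Int → Int → Int → List Int
  | [], _, _ => []
  | x :: xs, max_frame, count =>
    if x ≠ 1 then x :: utA xs max_frame 0
    else
      let count := count + 1
      if count > max_frame then 0 :: utA xs max_frame count
      else x :: utA xs max_frame count

def u_t_maxcut (u : List Int) (max_frame : Int) : List Int := utA u max_frame 0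

-- ===== PORT B =====
-- B's outer while loop: skip a non-1; else take the whole maximal run of 1s,
-- keep its first max(k,0) ones, overwrite the tail with zeros, continue after the run.
def utB : List Int → Int → List Int
  | [], _ => []
  | x :: xs, k =>
    if h : x = 1 then
      (List.takeWhile (fun y => y = 1) (x :: xs)).take ((max k 0).toNat)
        ++ List.replicate ((List.takeWhile (fun y => y = 1) (x :: xs)).length - (max k 0).toNat) 0
        ++ utB (List.dropWhile (fun y => y = 1) (x :: xs)) k
    else x :: utB xs k
termination_by l _ => l.length
decreasing_by
  · have h2 : List.dropWhile (fun y => y = 1) (x :: xs) = List.dropWhile (fun y => y = 1) xs := by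
      simp [List.dropWhile_cons, h]
    rw [h2]
    exact Nat.lt_succ_of_le (List.length_dropWhile_le _ _)
  · simp

def u_t_maxcut_alt (u : List Int) (max_frame : Int) : List Int := utB u max_frame

-- ===== PRECONDITION & SPEC =====
def Spec_u_t_maxcut (u : List Int) (max_frame : Int) (out : List Int) : Prop := out = u_t_maxcut_alt u max_frame
instance (u : List Int) (max_frame : Int) (out : List Int) : Decidable (Spec_u_t_maxcut u max_frame out) := by unfold Spec_u_t_maxcut; infer_instance

-- ===== CLAIM (what is proved, stated in full; the proofs are below) =====
def Claim_equal_u_t_maxcut : Prop := ∀ (u : List Int) (max_frame : Int), Dom_u_t_maxcut u max_frame → Spec_u_t_maxcut u max_frame (u_t_maxcut u max_frame)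

-- ===== LEMMAS AND PROOFS =====

-- A's output on a run of n ones entered with counter c
def onesOut : Nat → Int → Int → List Int
  | 0, _, _ => []
  | n + 1, c, mf => (if c + 1 > mf then (0 : Int) else 1) :: onesOut n (c + 1) mf

theorem utA_run (n : Nat) (rest : List Int) (mf : Int) :
    ∀ c : Int, utA (List.replicate n 1 ++ rest) mf c = onesOut n c mf ++ utA rest mf (c + n) := by
  induction n with
  | zero => intro c; simp [onesOut]
  | succ m ih =>
    intro c
    have hcast : c + 1 + (m : Int) = c + ((m + 1 : ℕ) : Int) := by push_cast; ring
    simp only [List.replicate_succ, List.cons_append, utA, onesOut]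
    split_ifs with h1 h2 <;>
      first
        | exact absurd rfl h1
        | (rw [ih, hcast]; try simp)

theorem onesOut_closed (n : Nat) :
    ∀ c mf : Int, onesOut n c mf =
      List.replicate (min ((mf - c).toNat) n) 1 ++ List.replicate (n - (mf - c).toNat) 0 := by
  induction n with
  | zero => intro c mf; simp [onesOut]
  | succ m ih =>
    intro c mf
    simp only [onesOut]
    by_cases h : c + 1 > mf
    · have h0 : (mf - c).toNat = 0 := by omega
      have h1 : (mf - (c + 1)).toNat = 0 := by omega
      rw [if_pos h, ih, h0, h1]
      simp [List.replicate_succ]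
    · have hk : (mf - c).toNat = (mf - (c + 1)).toNat + 1 := by omega
      have hsub : m + 1 - ((mf - (c + 1)).toNat + 1) = m - (mf - (c + 1)).toNat := by omega
      rw [if_neg h, ih, hk, Nat.succ_min_succ, hsub, List.replicate_succ]
      simp

theorem utA_reset (rest : List Int) (mf c : Int)
    (h : rest = [] ∨ ∃ y ys, rest = y :: ys ∧ y ≠ 1) :
    utA rest mf c = utA rest mf 0 := by
  rcases h with rfl | ⟨y, ys, rfl, hy⟩
  · simp [utA]
  · simp [utA, hy]

theorem takeWhile_ones (l : List Int) :
    List.takeWhile (fun y => y = 1) l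
      = List.replicate (List.takeWhile (fun y => y = 1) l).length 1 := by
  apply List.eq_replicate_of_mem
  intro y hy
  have := List.mem_takeWhile_imp hy
  simpa using this

theorem dropWhile_shape (l : List Int) :
    List.dropWhile (fun y => y = 1) l = [] ∨
      ∃ y ys, List.dropWhile (fun y => y = 1) l = y :: ys ∧ y ≠ 1 := by
  induction l with
  | nil => left; rfl
  | cons x xs ih =>
    by_cases hx : x = 1
    · rw [show List.dropWhile (fun y => y = 1) (x :: xs) = List.dropWhile (fun y => y = 1) xs from by
        simp [List.dropWhile_cons, hx]]
      exact ih
    · right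
      exact ⟨x, xs, by simp [List.dropWhile_cons, hx], hx⟩

theorem utA_eq_utB (u : List Int) (mf : Int) : utA u mf 0 = utB u mf := by
  induction hn : u.length using Nat.strong_induction_on generalizing u with
  | _ n ih =>
    subst hn
    match u with
    | [] => simp [utA, utB]
    | x :: xs =>
      by_cases hx : x = 1
      · subst hx
        rw [utB, dif_pos rfl]
        set run := List.takeWhile (fun y => y = 1) ((1 : Int) :: xs) with hrun
        set rest := List.dropWhile (fun y => y = 1) ((1 : Int) :: xs) with hrest
        have hrun1 : run = List.replicate run.length 1 := by
          rw [hrun]; exact takeWhile_ones _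
        have hsplit : (1 : Int) :: xs = List.replicate run.length 1 ++ rest := by
          conv_lhs => rw [← List.takeWhile_append_dropWhile (p := fun y => y = 1) (l := (1 : Int) :: xs)]
          rw [← hrun, ← hrest]
          congr 1
          try exact hrun1
        have hlen : rest.length < ((1 : Int) :: xs).length := by
          have hx1 : rest = List.dropWhile (fun y => y = 1) xs := by
            simp [hrest, List.dropWhile_cons]
          rw [hx1]
          exact Nat.lt_succ_of_le (List.length_dropWhile_le _ _)
        have hshape := dropWhile_shape ((1 : Int) :: xs)
        rw [← hrest] at hshape
        conv_lhs => rw [hsplit]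
        rw [utA_run, utA_reset rest mf _ hshape, onesOut_closed]
        rw [ih rest.length hlen rest rfl]
        have hmax : (mf - 0).toNat = (max mf 0).toNat := by omega
        have htake : run.take ((max mf 0).toNat)
            = List.replicate (min ((max mf 0).toNat) run.length) 1 := by
          conv_lhs => rw [hrun1]
          try rw [List.take_replicate]
        rw [hmax, htake]
        try rw [List.append_assoc]
      · rw [utB, dif_neg hx]
        rw [show utA (x :: xs) mf 0 = x :: utA xs mf 0 from by simp [utA, hx]]
        rw [ih xs.length (by simp) xs rfl]

-- ===== VERDICT (by name: the statement is the Claim_ definition above) =====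
theorem u_t_maxcut_spec : Claim_equal_u_t_maxcut := by
  intro u mf _
  show u_t_maxcut u mf = u_t_maxcut_alt u mf
  exact utA_eq_utB u mf
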